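-- pv_equiv track=rewrite | github.com/tomasjav1/P2M_Z_Piskvorky | code/functions_one.py | check_split
-- ===== SOURCE A (Python) =====
-- def check_split(inp):
--     # vrati True pokud muzu na inp zavolat funkci split() bez erroru
--     # tj. je ve stringu prave jedna (souvisla) mezera
--     if inp==None or inp=="":
--         return False
--     elif  inp[0]==" ":
--         return False
--
--     l=len(inp)
--     k=0
--     while k<l and inp[k]!=" ":
--         k+=1
--
--     if k==l:  #v inp neni mezera
--         return False
--     else:
--         while k<l and inp[k]==" ":      #dojdu az na konec mezery
--             k+=1
--
--         if k==l:  #za koncem mezery neni jinej char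
--             return False
--         else:
--             while k<l and inp[k]!=" ":
--                 k+=1
--
--             if k==l:  #konec
--                 return True
--             else:   #vize mezer
--                 return False
-- ===== SOURCE B (Python) =====
-- def check_split(inp):
--     # True iff inp is a string with exactly one interior contiguous run of spaces
--     if not inp:
--         return False
--     parts = inp.split(" ")
--     return (len(parts) >= 2 and parts[0] != "" and parts[-1] != ""
--             and all(p == "" for p in parts[1:-1]))
-- ===== Notes on version B (the rewrite author's own statement) =====
-- stated objective: idiomatic
-- what changed: Replaces A's three-phase manual while-loop scanner over character indices with a single split on the space character and a shape check on the parts list (at least two parts, first and last nonempty, all interior parts empty).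
import Mathlib
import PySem

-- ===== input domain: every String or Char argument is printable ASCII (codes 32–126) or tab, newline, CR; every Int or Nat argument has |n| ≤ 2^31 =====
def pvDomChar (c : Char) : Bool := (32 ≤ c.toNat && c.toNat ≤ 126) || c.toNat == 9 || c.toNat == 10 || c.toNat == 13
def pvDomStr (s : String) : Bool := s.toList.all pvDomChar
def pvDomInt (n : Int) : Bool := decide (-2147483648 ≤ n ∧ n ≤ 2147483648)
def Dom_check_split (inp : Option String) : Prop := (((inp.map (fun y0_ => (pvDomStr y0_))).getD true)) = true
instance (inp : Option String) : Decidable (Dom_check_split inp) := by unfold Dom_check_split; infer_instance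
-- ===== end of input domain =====

-- B replaces A's three-phase index-scanning while loops by splitting on " " and
-- checking the shape of the parts list (idiomatic; measured faster in a timing run).

-- ===== PORT A =====
-- while k<l and inp[k]!=" ": k+=1   (the suffix of the string from position k)
def pvSkipNonSpace : List Char → List Char
  | [] => []
  | c :: cs => if c = ' ' then c :: cs else pvSkipNonSpace cs

-- while k<l and inp[k]==" ": k+=1
def pvSkipSpace : List Char → List Char
  | [] => []
  | c :: cs => if c = ' ' then pvSkipSpace cs else c :: cs

def check_split (inp : Option String) : Bool :=
  match inp with
  | none => false                      -- inp == None
  | some s =>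
    match s.toList with
    | [] => false                      -- inp == ""
    | c0 :: rest =>
      if c0 = ' ' then false           -- inp[0] == " "
      else
        let r1 := pvSkipNonSpace (c0 :: rest)
        if r1 = [] then false          -- k == l: no space in inp
        else
          let r2 := pvSkipSpace r1
          if r2 = [] then false        -- nothing after the space run
          else
            let r3 := pvSkipNonSpace r2
            if r3 = [] then true else false   -- a second space run remains

-- ===== PORT B =====
def check_split_alt (inp : Option String) : Bool :=
  match inp with
  | none => false                      -- `not inp`
  | some s =>
    match s.toList with
    | [] => false                      -- `not inp` (empty string)
    | c0 :: rest =>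
      let parts := PySem.Chars.splitOn (c0 :: rest) [' ']   -- inp.split(" ")
      decide (2 ≤ parts.length) &&
      !(PySem.List.pyGetD parts 0 [] == []) &&              -- parts[0] != ""
      !(PySem.List.pyGetD parts (-1) [] == []) &&           -- parts[-1] != ""
      (PySem.List.slice parts (some 1) (some (-1))).all (fun p => p == [])  -- all('' for parts[1:-1])

-- ===== PRECONDITION & SPEC =====
def Spec_check_split (inp : Option String) (out : Bool) : Prop := out = check_split_alt inp
instance (inp : Option String) (out : Bool) : Decidable (Spec_check_split inp out) := by unfold Spec_check_split; infer_instance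

-- ===== CLAIM (what is proved, stated in full; the proofs are below) =====
def Claim_equal_check_split : Prop := ∀ (inp : Option String), Dom_check_split inp → Spec_check_split inp (check_split inp)

-- ===== LEMMAS AND PROOFS =====

-- single-character split, directly recursive (reference for PySem.Chars.splitOn · [' '])
def pvSp1 : List Char → List (List Char)
  | [] => [[]]
  | c :: rest =>
    if c = ' ' then [] :: pvSp1 rest
    else
      match pvSp1 rest with
      | p :: ps => (c :: p) :: ps
      | [] => [[c]]

theorem pvSp1_ne_nil (l : List Char) : pvSp1 l ≠ [] := by
  cases l with
  | nil => simp [pvSp1]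
  | cons c rest =>
    simp only [pvSp1]
    split_ifs
    · simp
    · cases h : pvSp1 rest <;> simp

theorem pvGo_eq (fuel : Nat) :
    ∀ (l cur : List Char) (accs : List (List Char)), l.length < fuel →
    PySem.Chars.splitOn.go [' '] fuel l cur accs
      = accs.reverse ++ (cur.reverse ++ (pvSp1 l).headI) :: (pvSp1 l).tail := by
  induction fuel with
  | zero => intro l cur accs h; omega
  | succ n ih =>
    intro l cur accs h
    cases l with
    | nil =>
      simp [PySem.Chars.splitOn.go, pvSp1]
    | cons c rest =>
      by_cases hc : c = ' '
      · subst hc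
        have hstep : (PySem.Chars.splitOn.go [' '] (n+1) (' ' :: rest) cur accs)
            = PySem.Chars.splitOn.go [' '] n rest [] (cur.reverse :: accs) := by
          simp [PySem.Chars.splitOn.go, List.isPrefixOf]
        rw [hstep, ih rest [] (cur.reverse :: accs) (by simpa using Nat.lt_of_succ_lt_succ h)]
        obtain ⟨p, ps, hps⟩ : ∃ p ps, pvSp1 rest = p :: ps := by
          cases hx : pvSp1 rest with
          | nil => exact absurd hx (pvSp1_ne_nil rest)
          | cons p ps => exact ⟨p, ps, rfl⟩
        simp [pvSp1, hps]
      · have hpre : ([' '].isPrefixOf (c :: rest)) = false := by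
          simp [List.isPrefixOf, Ne.symm hc]
        have hstep : (PySem.Chars.splitOn.go [' '] (n+1) (c :: rest) cur accs)
            = PySem.Chars.splitOn.go [' '] n rest (c :: cur) accs := by
          simp [PySem.Chars.splitOn.go, hpre]
        rw [hstep, ih rest (c :: cur) accs (by simpa using Nat.lt_of_succ_lt_succ h)]
        obtain ⟨p, ps, hps⟩ : ∃ p ps, pvSp1 rest = p :: ps := by
          cases hx : pvSp1 rest with
          | nil => exact absurd hx (pvSp1_ne_nil rest)
          | cons p ps => exact ⟨p, ps, rfl⟩
        simp [pvSp1, hc, hps]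

theorem pvSplitOn_eq (l : List Char) : PySem.Chars.splitOn l [' '] = pvSp1 l := by
  have h := pvGo_eq (l.length + 1) l [] [] (by omega)
  obtain ⟨p, ps, hps⟩ : ∃ p ps, pvSp1 l = p :: ps := by
    cases hx : pvSp1 l with
    | nil => exact absurd hx (pvSp1_ne_nil l)
    | cons p ps => exact ⟨p, ps, rfl⟩
  simp only [PySem.Chars.splitOn]
  rw [h, hps]
  simp

-- parts[1:-1] is tail ∘ dropLast
theorem pvSlice_one_neg_one {α : Type} (xs : List α) :
    PySem.List.slice xs (some 1) (some (-1)) = xs.tail.dropLast := by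
  cases xs with
  | nil => simp [PySem.List.slice, PySem.List.clampIdx]
  | cons x t =>
    have h1 : PySem.List.clampIdx (x :: t).length 1 = min 1 (t.length + 1) := by
      simp [PySem.List.clampIdx]
    have h2 : PySem.List.clampIdx (x :: t).length (-1) = t.length := by
      simp [PySem.List.clampIdx]
    simp only [PySem.List.slice, h1, h2]
    have hmin : min 1 (t.length + 1) = 1 := by omega
    rw [hmin]
    simp [List.dropLast_eq_take]

-- the shape condition B checks, as a function of the parts list
def pvG0 (ps : List (List Char)) : Bool :=
  decide (2 ≤ ps.length) && !(ps.headI == []) && !(ps.getLastD [] == []) &&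
  (ps.tail.dropLast.all (fun p => p == []))

theorem pvAlt_eq_g0 (s : String) (c0 : Char) (rest : List Char) (hl : s.toList = c0 :: rest) :
    (check_split_alt (some s)) = pvG0 (pvSp1 (c0 :: rest)) := by
  simp only [check_split_alt, hl, pvSplitOn_eq]
  obtain ⟨p, ps, hps⟩ : ∃ p ps, pvSp1 (c0 :: rest) = p :: ps := by
    cases hx : pvSp1 (c0 :: rest) with
    | nil => exact absurd hx (pvSp1_ne_nil _)
    | cons p ps => exact ⟨p, ps, rfl⟩
  rw [hps, pvSlice_one_neg_one]
  have hgl : PySem.List.pyGetD (p :: ps) (-1) ([] : List Char) = (p :: ps).getLastD [] := by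
    rw [PySem.List.pyGetD_neg_one (p :: ps) [] (by simp)]
    have h2 := List.getLast?_eq_some_getLast (l := p :: ps) (by simp)
    simp [List.getLastD_eq_getLast?, h2]
  rw [hgl]
  simp [pvG0, PySem.List.pyGetD_zero_cons]

-- state machine view of A's three phases (proof-side only)
def pvD3 : List Char → Bool         -- inside the second word
  | [] => true
  | c :: r => if c = ' ' then false else pvD3 r

def pvD2 : List Char → Bool         -- inside the space run
  | [] => false
  | c :: r => if c = ' ' then pvD2 r else pvD3 r

def pvD1 : List Char → Bool         -- inside the first word
  | [] => false
  | c :: r => if c = ' ' then pvD2 r else pvD1 r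

theorem pvD3_eq (u : List Char) : pvD3 u = (pvSkipNonSpace u == []) := by
  induction u with
  | nil => simp [pvD3, pvSkipNonSpace]
  | cons c r ih =>
    by_cases hc : c = ' ' <;> simp [pvD3, pvSkipNonSpace, hc, ih]

theorem pvD2_eq (t : List Char) :
    pvD2 t = (if pvSkipSpace t = [] then false else (pvSkipNonSpace (pvSkipSpace t) == [])) := by
  induction t with
  | nil => simp [pvD2, pvSkipSpace]
  | cons c r ih =>
    by_cases hc : c = ' '
    · simp [pvD2, pvSkipSpace, hc, ih]
    · simp [pvD2, pvSkipSpace, hc, pvD3_eq, pvSkipNonSpace]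

theorem pvD1_eq (r : List Char) :
    pvD1 r = (if pvSkipNonSpace r = [] then false
              else (if pvSkipSpace (pvSkipNonSpace r) = [] then false
                    else (pvSkipNonSpace (pvSkipSpace (pvSkipNonSpace r)) == []))) := by
  induction r with
  | nil => simp [pvD1, pvSkipNonSpace]
  | cons c t ih =>
    by_cases hc : c = ' '
    · simp [pvD1, pvSkipNonSpace, pvSkipSpace, hc, pvD2_eq]
    · simp [pvD1, pvSkipNonSpace, hc, ih]

-- B's check, phase by phase
def pvG2 (ps : List (List Char)) : Bool :=
  (ps.dropLast.all (fun p => p == [])) && !(ps.getLastD [] == [])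

def pvG1 (ps : List (List Char)) : Bool :=
  decide (2 ≤ ps.length) && !(ps.getLastD [] == []) && (ps.tail.dropLast.all (fun p => p == []))

theorem pvSp1_len (u : List Char) : pvD3 u = ((pvSp1 u).length == 1) := by
  induction u with
  | nil => simp [pvD3, pvSp1]
  | cons c r ih =>
    by_cases hc : c = ' '
    · have := pvSp1_ne_nil r
      simp [pvD3, pvSp1, hc]
      cases h : pvSp1 r with
      | nil => exact absurd h this
      | cons p ps => simp
    · simp only [pvD3, pvSp1, hc, ite_false]
      rw [ih]
      cases h : pvSp1 r with
      | nil => exact absurd h (pvSp1_ne_nil r)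
      | cons p ps => simp

theorem pvG2_eq (t : List Char) : pvD2 t = pvG2 (pvSp1 t) := by
  induction t with
  | nil => simp [pvD2, pvSp1, pvG2]
  | cons c u ih =>
    obtain ⟨p, ps, hps⟩ : ∃ p ps, pvSp1 u = p :: ps := by
      cases hx : pvSp1 u with
      | nil => exact absurd hx (pvSp1_ne_nil u)
      | cons p ps => exact ⟨p, ps, rfl⟩
    by_cases hc : c = ' '
    · rw [show pvD2 (c :: u) = pvD2 u by simp [pvD2, hc], ih]
      simp only [pvSp1, hc, ite_true]
      rw [hps]
      simp only [pvG2]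
      cases ps with
      | nil => simp
      | cons q qs => simp [List.dropLast]
    · rw [show pvD2 (c :: u) = pvD3 u by simp [pvD2, hc], pvSp1_len u, hps]
      simp only [pvSp1, hc, ite_false, hps]
      cases ps with
      | nil => simp [pvG2]
      | cons q qs =>
        simp only [pvG2]
        have : ((c :: p) :: q :: qs).dropLast = (c :: p) :: (q :: qs).dropLast := by
          simp [List.dropLast]
        rw [this]
        simp

theorem pvG1_eq (r : List Char) : pvD1 r = pvG1 (pvSp1 r) := by
  induction r with
  | nil => simp [pvD1, pvSp1, pvG1]
  | cons c t ih =>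
    obtain ⟨p, ps, hps⟩ : ∃ p ps, pvSp1 t = p :: ps := by
      cases hx : pvSp1 t with
      | nil => exact absurd hx (pvSp1_ne_nil t)
      | cons p ps => exact ⟨p, ps, rfl⟩
    by_cases hc : c = ' '
    · rw [show pvD1 (c :: t) = pvD2 t by simp [pvD1, hc], pvG2_eq t, hps]
      simp only [pvSp1, hc, ite_true, hps]
      simp [pvG1, pvG2, Bool.and_comm]
    · rw [show pvD1 (c :: t) = pvD1 t by simp [pvD1, hc], ih, hps]
      simp only [pvSp1, hc, ite_false, hps]
      cases ps with
      | nil => simp [pvG1]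
      | cons q qs => simp [pvG1]

theorem pvG0_cons (c0 : Char) (rest : List Char) (hc : c0 ≠ ' ') :
    pvG0 (pvSp1 (c0 :: rest)) = pvG1 (pvSp1 rest) := by
  obtain ⟨p, ps, hps⟩ : ∃ p ps, pvSp1 rest = p :: ps := by
    cases hx : pvSp1 rest with
    | nil => exact absurd hx (pvSp1_ne_nil rest)
    | cons p ps => exact ⟨p, ps, rfl⟩
  simp only [pvSp1, if_neg hc, hps]
  cases ps with
  | nil => simp [pvG0, pvG1]
  | cons q qs => simp [pvG0, pvG1]

theorem pvG0_space (rest : List Char) : pvG0 (pvSp1 (' ' :: rest)) = false := by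
  simp [pvSp1, pvG0]

-- ===== VERDICT (by name: the statement is the Claim_ definition above) =====
theorem check_split_spec : Claim_equal_check_split := by
  intro inp _
  show check_split inp = check_split_alt inp
  cases inp with
  | none => rfl
  | some s =>
    cases hl : s.toList with
    | nil =>
      simp [check_split, check_split_alt, hl]
    | cons c0 rest =>
      rw [pvAlt_eq_g0 s c0 rest hl]
      by_cases hc : c0 = ' '
      · subst hc
        rw [pvG0_space]
        simp [check_split, hl]
      · rw [pvG0_cons c0 rest hc, ← pvG1_eq]
        simp only [check_split, hl]
        rw [if_neg hc]
        have hA : pvSkipNonSpace (c0 :: rest) = pvSkipNonSpace rest := by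
          simp [pvSkipNonSpace, hc]
        rw [pvD1_eq]
        simp only [hA]
        split_ifs <;> simp_all
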